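-- pv_equiv track=rewrite | github.com/primust-dev/primust-sdk | packages/verifier-py/src/primust_verify/cli.py | _format_gaps_summary
-- ===== SOURCE A (Python) =====
-- def _format_gaps_summary(gaps: list[dict]) -> str:
--     if not gaps:
--         return "0"
--     counts: dict[str, int] = {}
--     for g in gaps:
--         sev = g.get("severity", "Unknown")
--         counts[sev] = counts.get(sev, 0) + 1
--     parts = [f"{n} {sev}" for sev, n in counts.items()]
--     return f"{len(gaps)} ({', '.join(parts)})"
-- ===== SOURCE B (Python) =====
-- def _format_gaps_summary(gaps: list[dict]) -> str:
--     if not gaps: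
--         return "0"
--
--     def parts(sevs: list[str]) -> list[str]:
--         if not sevs:
--             return []
--         sev = sevs[0]
--         rest = [s for s in sevs if s != sev]
--         return [f"{len(sevs) - len(rest)} {sev}"] + parts(rest)
--
--     sevs = [g.get("severity", "Unknown") for g in gaps]
--     return f"{len(gaps)} ({', '.join(parts(sevs))})"
-- ===== Notes on version B (the rewrite author's own statement) =====
-- stated objective: alternative
-- what changed: Replaces the single-pass dict-counter accumulation with a recursive partition: take the first remaining severity, count it by filtering it out, and recurse on the filtered rest.
import Mathlib
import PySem

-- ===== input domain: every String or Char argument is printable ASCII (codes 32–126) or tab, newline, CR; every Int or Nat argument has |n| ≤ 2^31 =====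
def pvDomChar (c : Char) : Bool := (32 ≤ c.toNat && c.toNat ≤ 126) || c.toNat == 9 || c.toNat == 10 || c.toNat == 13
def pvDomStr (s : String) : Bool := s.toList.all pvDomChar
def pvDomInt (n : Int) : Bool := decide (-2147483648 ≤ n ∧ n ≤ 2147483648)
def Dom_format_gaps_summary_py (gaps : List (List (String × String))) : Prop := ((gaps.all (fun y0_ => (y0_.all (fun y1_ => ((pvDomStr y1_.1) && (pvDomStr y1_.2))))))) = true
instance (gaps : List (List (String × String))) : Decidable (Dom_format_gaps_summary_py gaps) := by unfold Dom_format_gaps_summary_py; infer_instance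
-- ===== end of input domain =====

-- B replaces A's one-pass dict-counter with a recursive partition of the severity list (objective: alternative).

-- ===== PORT A =====
def format_gaps_summary_py (gaps : List (List (String × String))) : String :=
  if gaps = [] then "0"
  else
    let counts : PySem.Dict String Int :=
      gaps.foldl (fun counts g =>
        let sev := PySem.Dict.getD (PySem.Dict.mk g) "severity" "Unknown"
        counts.insert sev (counts.getD sev 0 + 1)) PySem.Dict.empty
    let parts := counts.items.map (fun p => PySem.Int.toStr p.2 ++ " " ++ p.1)
    PySem.Int.toStr (gaps.length : Int) ++ " (" ++ PySem.Str.join ", " parts ++ ")"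

-- ===== PORT B =====
-- helper: the inner recursive 'parts' of Source B
def pvPartsB : List String → List String
  | [] => []
  | sev :: tl =>
    let rest := (sev :: tl).filter (fun s => s != sev)
    (PySem.Int.toStr (((sev :: tl).length : Int) - (rest.length : Int)) ++ " " ++ sev) :: pvPartsB rest
termination_by sevs => sevs.length
decreasing_by
  simp only [List.filter]
  simp
  exact List.length_filter_le _ _

def format_gaps_summary_py_alt (gaps : List (List (String × String))) : String :=
  if gaps = [] then "0"
  else
    let sevs := gaps.map (fun g => PySem.Dict.getD (PySem.Dict.mk g) "severity" "Unknown")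
    PySem.Int.toStr (gaps.length : Int) ++ " (" ++ PySem.Str.join ", " (pvPartsB sevs) ++ ")"

-- ===== PRECONDITION & SPEC =====
def Spec_format_gaps_summary_py (gaps : List (List (String × String))) (out : String) : Prop := out = format_gaps_summary_py_alt gaps
instance (gaps : List (List (String × String))) (out : String) : Decidable (Spec_format_gaps_summary_py gaps out) := by unfold Spec_format_gaps_summary_py; infer_instance

-- ===== CLAIM =====
def Claim_equal_format_gaps_summary_py : Prop := ∀ (gaps : List (List (String × String))), Dom_format_gaps_summary_py gaps → Spec_format_gaps_summary_py gaps (format_gaps_summary_py gaps)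

-- ===== LEMMAS AND PROOFS =====

-- contains is preserved by Set.add
theorem pvAdd_contains (s : PySem.Set String) (x a : String) (h : s.contains a = true) :
    (PySem.Set.add s x).contains a = true := by
  unfold PySem.Set.add
  split_ifs with hc
  · exact h
  · simp only [PySem.Set.contains, List.contains_eq_mem, decide_eq_true_eq] at h ⊢
    exact List.mem_append_left _ h

-- adding elements equal to an already-present `a` is a no-op: filtering them out does not change the fold
theorem pvSkip (l : List String) (s : PySem.Set String) (a : String) (h : s.contains a = true) :
    List.foldl PySem.Set.add s (l.filter (fun x => x != a)) = List.foldl PySem.Set.add s l := by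
  induction l generalizing s with
  | nil => rfl
  | cons x l ih =>
    by_cases hx : (x == a) = true
    · have hxa : x = a := by simpa using hx
      have hadd : PySem.Set.add s x = s := by
        unfold PySem.Set.add
        rw [hxa, if_pos h]
      simp only [List.filter_cons, hx, bne, Bool.not_true, List.foldl_cons, hadd]
      exact ih s h
    · simp only [List.filter_cons, bne, hx, Bool.not_false, if_pos, List.foldl_cons]
      exact ih (PySem.Set.add s x) (pvAdd_contains s x a h)

-- a head that no later element equals can be pulled out of the fold
theorem pvPull (m : List String) (s : List String) (x : String)
    (h : ∀ y ∈ m, (y == x) = false) :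
    List.foldl PySem.Set.add (x :: s) m = x :: List.foldl PySem.Set.add s m := by
  induction m generalizing s with
  | nil => rfl
  | cons y m ih =>
    have hy : (y == x) = false := h y (by simp)
    have hcont : PySem.Set.contains (x :: s) y = PySem.Set.contains s y := by
      simp only [PySem.Set.contains, List.contains_eq_mem, List.mem_cons, decide_eq_decide]
      have : ¬ y = x := by simpa using hy
      tauto
    have hadd : PySem.Set.add (x :: s) y = x :: PySem.Set.add s y := by
      unfold PySem.Set.add
      rw [hcont]
      split_ifs <;> simp
    simp only [List.foldl_cons, hadd]
    exact ih (PySem.Set.add s y) (fun z hz => h z (by simp [hz]))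

-- first-seen dedup, recursively: head, then dedup of the tail with the head's copies removed
theorem pvDedup_cons (a : String) (l : List String) :
    PySem.List.dedup (a :: l) = a :: PySem.List.dedup (l.filter (fun x => x != a)) := by
  unfold PySem.List.dedup PySem.Set.ofList
  have h1 : PySem.Set.add PySem.Set.empty a = [a] := rfl
  rw [List.foldl_cons, h1,
      ← pvSkip l [a] a (by simp [List.contains_eq_mem]),
      pvPull (l.filter (fun x => x != a)) [] a
        (fun y hy => by simpa using (List.mem_filter.mp hy).2)]
  rfl

theorem pvParts_eq_dedup_map (sevs : List String) :
    pvPartsB sevs = (PySem.List.dedup sevs).map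
      (fun k => PySem.Int.toStr (sevs.count k : Int) ++ " " ++ k) := by
  induction sevs using pvPartsB.induct with
  | case1 => simp [pvPartsB, PySem.List.dedup, PySem.Set.ofList]
  | case2 sev tl rest ih =>
    rw [pvPartsB, pvDedup_cons, List.map_cons]
    have hrest : (sev :: tl).filter (fun s => s != sev) = tl.filter (fun x => x != sev) := by
      simp
    have hlen : (tl.filter (fun x => x != sev)).length + (sev :: tl).count sev
        = (sev :: tl).length := by
      have h2 : (sev :: tl).count sev = tl.countP (fun x => x == sev) + 1 := by
        simp [List.count]
      have h3 : (tl.filter (fun x => x != sev)).length = tl.countP (fun x => !(x == sev)) := by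
        rw [← List.countP_eq_length_filter]
        exact List.countP_congr (fun x _ => by simp [bne])
      have h4 : tl.countP (fun x => x == sev) + tl.countP (fun x => !(x == sev)) = tl.length := by
        simpa using (List.length_eq_countP_add_countP (l := tl) (p := fun x => x == sev)).symm
      simp only [List.length_cons, h2, h3]
      omega
    have hrd : rest = (sev :: tl).filter (fun s => s != sev) := rfl
    rw [hrd, hrest] at ih
    simp only [hrest]
    congr 1
    · -- head: len(sevs) - len(rest) = count of the head severity
      have hle : (tl.filter (fun x => x != sev)).length ≤ (sev :: tl).length := by
        simp only [List.length_cons]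
        exact Nat.le_succ_of_le (List.length_filter_le _ _)
      have harg : (((sev :: tl).length : Int) - ((tl.filter (fun x => x != sev)).length : Int))
          = ((sev :: tl).count sev : Int) := by omega
      rw [harg]
    · -- tail: counts in the filtered rest equal counts in the full list
      rw [ih]
      apply List.map_congr_left
      intro k hk
      have hkmem : k ∈ tl.filter (fun x => x != sev) := (PySem.List.mem_dedup _ _).mp hk
      have hkne : (k == sev) = false := by
        have := (List.mem_filter.mp hkmem).2
        simpa using this
      have hc1 : (tl.filter (fun x => x != sev)).count k = tl.count k :=
        List.count_filter (by simpa [bne] using hkne)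
      have hc2 : (sev :: tl).count k = tl.count k := by
        rw [List.count_cons]
        have hne : (sev == k) = false := by
          have h1 : ¬ k = sev := by simpa using hkne
          simp only [beq_eq_false_iff_ne, ne_eq]
          tauto
        simp [hne]
      rw [hc1, hc2]

-- ===== VERDICT (by name: the statement is the Claim_ definition above) =====
theorem format_gaps_summary_py_spec : Claim_equal_format_gaps_summary_py := by
  intro gaps _
  unfold Spec_format_gaps_summary_py format_gaps_summary_py format_gaps_summary_py_alt
  by_cases h : gaps = []
  · simp [h]
  · have hfold : gaps.foldl (fun (counts : PySem.Dict String Int) g =>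
        let sev := PySem.Dict.getD (PySem.Dict.mk g) "severity" "Unknown"
        counts.insert sev (counts.getD sev 0 + 1)) PySem.Dict.empty
      = PySem.Dict.counter (gaps.map (fun g => PySem.Dict.getD (PySem.Dict.mk g) "severity" "Unknown")) := by
      rw [← PySem.Dict.foldl_insert_getD_add_one_eq_counter, List.foldl_map]
    rw [if_neg h, if_neg h]
    simp only [hfold, PySem.Dict.items_counter, pvParts_eq_dedup_map,
      PySem.List.dedup_eq_ofList, List.map_map, Function.comp_def]
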